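-- pv_equiv track=rewrite | github.com/utkuturk/kind | balanced_latin.py | balanced_latin
-- ===== SOURCE A (Python) =====
-- def balanced_latin(array, participantId):
--     result = []
--     i = 0
--     j = 0
--     h = 0
--
--     while i < len(array):
--         val = 0
--         if i < 2 or i % 2 != 0:
--             val = j
--             j += 1
--         else:
--             val = len(array) - h - 1
--             h += 1
--
--         idx = (val + participantId) % len(array)
--         result.append(array[idx])
--
--         i += 1
--
--     return result
-- ===== SOURCE B (Python) =====
-- def balanced_latin(array, participantId):
--     n = len(array)
--     if n == 0:
--         return []
--     vals = [0]
--     for a, d in zip(range(1, n), range(n - 1, 0, -1)):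
--         vals.append(a)
--         vals.append(d)
--     vals = vals[:n]
--     return [array[(v + participantId) % n] for v in vals]
-- ===== Notes on version B (the rewrite author's own statement) =====
-- stated objective: alternative
-- what changed: Replaces the stateful while-loop with i/j/h counters and a parity branch by building the index sequence declaratively: 0 followed by the interleaving of the ascending and descending ranges (zip then flatten), truncated to n, and a single comprehension mapping it through the array; measured ~2x faster (no per-iteration Python-level branching/counter updates).
import Mathlib
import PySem

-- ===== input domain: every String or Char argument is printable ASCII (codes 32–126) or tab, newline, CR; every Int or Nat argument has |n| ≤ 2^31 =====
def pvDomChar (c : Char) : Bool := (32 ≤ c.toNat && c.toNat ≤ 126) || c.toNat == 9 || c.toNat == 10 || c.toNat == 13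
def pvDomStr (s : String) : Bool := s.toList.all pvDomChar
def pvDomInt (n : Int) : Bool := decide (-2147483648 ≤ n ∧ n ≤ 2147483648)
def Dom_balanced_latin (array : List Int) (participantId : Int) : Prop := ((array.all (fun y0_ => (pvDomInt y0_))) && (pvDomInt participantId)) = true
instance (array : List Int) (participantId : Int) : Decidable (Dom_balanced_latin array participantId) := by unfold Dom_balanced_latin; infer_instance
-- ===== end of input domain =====

-- B replaces A's stateful while-loop (counters i/j/h and a parity branch) by a declarative
-- construction of the index sequence: 0 followed by the flattened zip of the ascending and
-- descending ranges, truncated to n, mapped through the array (objective: alternative).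

-- ===== PORT A =====
-- A's while-loop, recursing on the remaining iterations; `array[idx]` is ported with
-- pyGetD (idx = (val+pid) % len is always in range when the loop body runs, so no raise).
def balancedLatinLoop (array : List Int) (participantId : Int) (i j h : Int)
    (result : List Int) : List Int :=
  if _hl : i < (array.length : Int) then
    let val : Int := if i < 2 ∨ PySem.Int.mod i 2 ≠ 0 then j else (array.length : Int) - h - 1
    let j' : Int := if i < 2 ∨ PySem.Int.mod i 2 ≠ 0 then j + 1 else j
    let h' : Int := if i < 2 ∨ PySem.Int.mod i 2 ≠ 0 then h else h + 1
    let idx : Int := PySem.Int.mod (val + participantId) (array.length : Int)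
    balancedLatinLoop array participantId (i + 1) j' h'
      (result ++ [PySem.List.pyGetD array idx 0])
  else result
termination_by ((array.length : Int) - i).toNat
decreasing_by omega

def balanced_latin (array : List Int) (participantId : Int) : List Int :=
  balancedLatinLoop array participantId 0 0 0 []

-- ===== PORT B =====
def balanced_latin_alt (array : List Int) (participantId : Int) : List Int :=
  let n : Int := array.length
  if n = 0 then []
  else
    let pairs := List.zip (PySem.List.pyRange 1 n 1) (PySem.List.pyRange (n - 1) 0 (-1))
    let vals := pairs.foldl (fun acc p => acc ++ [p.1, p.2]) [0]
    let vals := PySem.List.slice vals none (some n)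
    vals.map (fun v => PySem.List.pyGetD array (PySem.Int.mod (v + participantId) n) 0)

-- ===== PRECONDITION & SPEC =====
def Spec_balanced_latin (array : List Int) (participantId : Int) (out : List Int) : Prop := out = balanced_latin_alt array participantId
instance (array : List Int) (participantId : Int) (out : List Int) : Decidable (Spec_balanced_latin array participantId out) := by unfold Spec_balanced_latin; infer_instance

-- ===== CLAIM (what is proved, stated in full; the proofs are below) =====
def Claim_equal_balanced_latin : Prop := ∀ (array : List Int) (participantId : Int), Dom_balanced_latin array participantId → Spec_balanced_latin array participantId (balanced_latin array participantId)

-- ===== LEMMAS AND PROOFS =====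

-- the k-th index value both programs select (before adding participantId)
def pvValA (n k : Nat) : Int :=
  if k < 2 ∨ k % 2 ≠ 0 then (((k + 1) / 2 : Nat) : Int) else (n : Int) - ((k / 2 : Nat) : Int)

-- the element appended for index value v
def pvF (array : List Int) (participantId v : Int) : Int :=
  PySem.List.pyGetD array (PySem.Int.mod (v + participantId) (array.length : Int)) 0

-- closed forms of A's counters j and h at the start of iteration k
def pvJ (k : Nat) : Int := if k = 0 then 0 else ((k / 2 : Nat) : Int) + 1
def pvH (k : Nat) : Int := (((k - 1) / 2 : Nat) : Int)

lemma pvLoop_eq (array : List Int) (participantId : Int) :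
    ∀ (m k : Nat), k + m = array.length → ∀ result,
      balancedLatinLoop array participantId (k : Int) (pvJ k) (pvH k) result
        = result ++ (List.range' k m).map (fun t => pvF array participantId (pvValA array.length t)) := by
  intro m
  induction m with
  | zero =>
    intro k hk result
    rw [balancedLatinLoop, dif_neg (by omega)]
    simp
  | succ m ih =>
    intro k hk result
    have hkl : (k : Int) < (array.length : Int) := by omega
    rw [balancedLatinLoop, dif_pos hkl]
    by_cases hc : (k : Int) < 2 ∨ PySem.Int.mod (k : Int) 2 ≠ 0
    · have hc' : k < 2 ∨ k % 2 ≠ 0 := by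
        rw [PySem.Int.mod_eq_emod_of_pos (by omega)] at hc; omega
      simp only [if_pos hc]
      have e1 : pvJ k + 1 = pvJ (k + 1) := by
        unfold pvJ; rw [if_neg (Nat.succ_ne_zero k)]; split_ifs <;> omega
      have e2 : pvH k = pvH (k + 1) := by unfold pvH; omega
      have e3 : pvJ k = pvValA array.length k := by
        unfold pvJ pvValA; rw [if_pos hc']; split_ifs <;> omega
      rw [e1, e2, e3, show ((k : Int) + 1) = ((k + 1 : Nat) : Int) by push_cast; ring,
        ih (k + 1) (by omega)]
      rw [List.range'_succ]
      simp [pvF]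
    · have hc' : ¬ (k < 2 ∨ k % 2 ≠ 0) := by
        rw [PySem.Int.mod_eq_emod_of_pos (by omega)] at hc; omega
      simp only [if_neg hc]
      have e1 : pvH k + 1 = pvH (k + 1) := by unfold pvH; omega
      have e2 : pvJ k = pvJ (k + 1) := by
        unfold pvJ; rw [if_neg (Nat.succ_ne_zero k), if_neg (by omega : ¬ k = 0)]; omega
      have e3 : (array.length : Int) - pvH k - 1 = pvValA array.length k := by
        unfold pvH pvValA; rw [if_neg hc']; omega
      rw [e1, e2, e3, show ((k : Int) + 1) = ((k + 1 : Nat) : Int) by push_cast; ring,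
        ih (k + 1) (by omega)]
      rw [List.range'_succ]
      simp [pvF]

lemma pvA_eq (array : List Int) (participantId : Int) :
    balanced_latin array participantId
      = (List.range array.length).map (fun t => pvF array participantId (pvValA array.length t)) := by
  have h := pvLoop_eq array participantId array.length 0 (by omega) []
  simpa [balanced_latin, pvJ, pvH, List.range_eq_range'] using h

lemma pvFlat2_get? (a b : Nat → Int) :
    ∀ (r s k : Nat), k < 2 * r →
      ((List.range' s r).flatMap (fun m => [a m, b m]))[k]?
        = some (if k % 2 = 0 then a (s + k / 2) else b (s + k / 2)) := by
  intro r
  induction r with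
  | zero => intro s k hk; omega
  | succ r ih =>
    intro s k hk
    rw [List.range'_succ, List.flatMap_cons]
    match k with
    | 0 => simp
    | 1 => simp
    | (k + 2) =>
      have : ([a s, b s] ++ (List.range' (s + 1) r).flatMap (fun m => [a m, b m]))[k + 2]?
          = ((List.range' (s + 1) r).flatMap (fun m => [a m, b m]))[k]? := by
        simp
      rw [this, ih (s + 1) k (by omega)]
      congr 1
      rw [show (k + 2) % 2 = k % 2 by omega, show s + (k + 2) / 2 = s + 1 + k / 2 by omega]

lemma pvVals_take (n : Nat) (hn : 0 < n) :
    (((0 : Int) :: (List.range (n - 1)).flatMap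
        (fun (m : Nat) => [1 + (m : Int), (n : Int) - 1 - (m : Int)])).take n)
      = (List.range n).map (pvValA n) := by
  apply List.ext_getElem?
  intro k
  by_cases hk : k < n
  · rw [List.getElem?_take_of_lt hk, List.getElem?_map, List.getElem?_range hk]
    match k with
    | 0 => simp [pvValA]
    | (k + 1) =>
      have h2 : k < 2 * (n - 1) := by omega
      rw [List.getElem?_cons_succ, List.range_eq_range',
        pvFlat2_get? (fun (m : Nat) => 1 + (m : Int)) (fun (m : Nat) => (n : Int) - 1 - (m : Int))
          (n - 1) 0 k h2]
      simp only [Option.map_some]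
      congr 1
      unfold pvValA
      split_ifs <;> omega
  · rw [List.getElem?_eq_none (by simp [List.length_take]; omega),
      List.getElem?_eq_none (by simp; omega)]

lemma pvB_eq (array : List Int) (participantId : Int) :
    balanced_latin_alt array participantId
      = (List.range array.length).map (fun t => pvF array participantId (pvValA array.length t)) := by
  by_cases hn : array.length = 0
  · simp [balanced_latin_alt, hn]
  · have hn' : ((array.length : Int)) ≠ 0 := by exact_mod_cast hn
    have hpos : (0 : Int) ≤ (array.length : Int) := by positivity
    simp only [balanced_latin_alt, if_neg hn']
    rw [PySem.List.pyRange_one, PySem.List.pyRange_neg_one,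
      show ((array.length : Int) - 1).toNat = array.length - 1 by omega,
      show ((array.length : Int) - 1 - 0).toNat = array.length - 1 by omega,
      List.zip_map', PySem.List.foldl_append_eq_flatMap, List.flatMap_map]
    dsimp only
    rw [PySem.List.slice_to _ hpos, show ((array.length : Int)).toNat = array.length by omega]
    simp only [List.singleton_append]
    rw [pvVals_take array.length (by omega)]
    simp [pvF]

-- ===== VERDICT (by name: the statement is the Claim_ definition above) =====
theorem balanced_latin_spec : Claim_equal_balanced_latin := by
  intro array participantId _
  unfold Spec_balanced_latin
  rw [pvA_eq, pvB_eq]
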